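-- pv_equiv track=rewrite | github.com/jakekang28/IDWTG | app.py | StringReplacer
-- ===== SOURCE A (Python) =====
-- def StringReplacer(targstr):
--     targstr = targstr.replace("|<", "k")
--     targstr = targstr.replace("|>", "p")
--     targstr = targstr.replace("()", "o")
--     targstr = targstr.replace("[]", "o")
--     targstr = targstr.replace("{}", "o")
--
--     n = len(targstr)
--     newstring = list(targstr)
--
--     for i in range(n):
--         if newstring[i] == '@':
--             newstring[i] = 'a'
--         elif newstring[i] == '$':
--             newstring[i] = 's'
--         elif newstring[i] == '0':
--             newstring[i] = 'o'
--         elif newstring[i] == '7':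
--             newstring[i] = 't'
--         elif newstring[i] == '3':
--             newstring[i] = 'e'
--         elif newstring[i] == '5':
--             newstring[i] = 's'
--         elif newstring[i] == '<':
--             newstring[i] = 'c'
--
--     targstr = "".join(newstring)
--     return targstr
-- ===== SOURCE B (Python) =====
-- def StringReplacer(targstr):
--     PAIRS = {"|<": "k", "|>": "p", "()": "o", "[]": "o", "{}": "o"}
--     SINGLES = {"@": "a", "$": "s", "0": "o", "7": "t", "3": "e", "5": "s", "<": "c"}
--     out = []
--     i = 0
--     n = len(targstr)
--     while i < n:
--         two = targstr[i:i + 2]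
--         if two in PAIRS:
--             out.append(PAIRS[two])
--             i += 2
--         else:
--             c = targstr[i]
--             out.append(SINGLES.get(c, c))
--             i += 1
--     return "".join(out)
-- ===== Notes on version B (the rewrite author's own statement) =====
-- stated objective: alternative
-- what changed: Replaces A's five sequential full-string str.replace passes plus a separate per-character rewriting loop with a single left-to-right scan that matches the two-char patterns and the single-char leetspeak table in one pass.
import Mathlib
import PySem

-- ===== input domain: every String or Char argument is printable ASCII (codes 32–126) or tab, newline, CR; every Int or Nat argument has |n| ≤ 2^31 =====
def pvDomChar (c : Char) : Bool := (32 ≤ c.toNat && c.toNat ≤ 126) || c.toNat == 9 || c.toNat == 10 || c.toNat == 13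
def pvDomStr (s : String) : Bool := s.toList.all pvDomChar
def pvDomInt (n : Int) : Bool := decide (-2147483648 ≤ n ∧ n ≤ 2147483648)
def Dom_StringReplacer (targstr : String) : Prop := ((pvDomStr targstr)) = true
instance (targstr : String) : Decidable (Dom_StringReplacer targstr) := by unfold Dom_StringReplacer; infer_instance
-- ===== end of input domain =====

-- B fuses A's five str.replace passes and subsequent per-char rewriting loop into one
-- left-to-right scan (objective: alternative single-pass decomposition, same cost class).

-- loop body of A's for-loop, as a named helper
def stepA (ns : List Char) (i : Int) : List Char :=
  if PySem.List.pyGetD ns i ' ' = '@' then PySem.List.pySetD ns i 'a'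
  else if PySem.List.pyGetD ns i ' ' = '$' then PySem.List.pySetD ns i 's'
  else if PySem.List.pyGetD ns i ' ' = '0' then PySem.List.pySetD ns i 'o'
  else if PySem.List.pyGetD ns i ' ' = '7' then PySem.List.pySetD ns i 't'
  else if PySem.List.pyGetD ns i ' ' = '3' then PySem.List.pySetD ns i 'e'
  else if PySem.List.pyGetD ns i ' ' = '5' then PySem.List.pySetD ns i 's'
  else if PySem.List.pyGetD ns i ' ' = '<' then PySem.List.pySetD ns i 'c'
  else ns

-- ===== PORT A =====
def StringReplacer (targstr : String) : String :=
  let t1 := PySem.Str.replace targstr "|<" "k"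
  let t2 := PySem.Str.replace t1 "|>" "p"
  let t3 := PySem.Str.replace t2 "()" "o"
  let t4 := PySem.Str.replace t3 "[]" "o"
  let t5 := PySem.Str.replace t4 "{}" "o"
  let n : Int := PySem.Str.len t5
  let newstring : List Char := t5.toList
  let newstring :=
    (PySem.List.pyRange 0 n 1).foldl stepA newstring
  String.ofList newstring

-- ===== PORT B =====
-- two-char patterns ("|<" "|>" "()" "[]" "{}") and their replacement letter
def altPair (a b : Char) : Option Char :=
  if a = '|' ∧ b = '<' then some 'k'
  else if a = '|' ∧ b = '>' then some 'p'
  else if a = '(' ∧ b = ')' then some 'o'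
  else if a = '[' ∧ b = ']' then some 'o'
  else if a = '{' ∧ b = '}' then some 'o'
  else none

-- single-char leetspeak table (SINGLES.get(c, c) in Source B)
def altSingle (c : Char) : Char :=
  if c = '@' then 'a'
  else if c = '$' then 's'
  else if c = '0' then 'o'
  else if c = '7' then 't'
  else if c = '3' then 'e'
  else if c = '5' then 's'
  else if c = '<' then 'c'
  else c

-- the while-loop of Source B: consume two chars on a pair pattern, else one
def altScan : List Char → List Char
  | a :: b :: t =>
    match altPair a b with
    | some r => r :: altScan t
    | none => altSingle a :: altScan (b :: t)
  | [a] => [altSingle a]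
  | [] => []

def StringReplacer_alt (targstr : String) : String :=
  String.ofList (altScan targstr.toList)

-- ===== PRECONDITION & SPEC =====
def Spec_StringReplacer (targstr : String) (out : String) : Prop := out = StringReplacer_alt targstr
instance (targstr : String) (out : String) : Decidable (Spec_StringReplacer targstr out) := by unfold Spec_StringReplacer; infer_instance

-- ===== CLAIM (what is proved, stated in full; the proofs are below) =====
def Claim_equal_StringReplacer : Prop := ∀ (targstr : String), Dom_StringReplacer targstr → Spec_StringReplacer targstr (StringReplacer targstr)

-- ===== LEMMAS AND PROOFS =====

-- Specialisation of PySem.Chars.replace to a 2-char pattern and 1-char replacement.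
def rep2 (x y z : Char) : List Char → List Char
  | a :: b :: t => if a = x ∧ b = y then z :: rep2 x y z t else a :: rep2 x y z (b :: t)
  | l => l

theorem rep2_single (x y z a : Char) : rep2 x y z [a] = [a] := rfl

theorem go_eq_rep2 (x y z : Char) : ∀ (fuel : Nat) (l acc : List Char), l.length ≤ fuel →
    PySem.Chars.replace.go [x, y] [z] fuel l acc = acc.reverse ++ rep2 x y z l := by
  intro fuel
  induction fuel with
  | zero =>
    intro l acc h
    have : l = [] := List.eq_nil_of_length_eq_zero (Nat.le_zero.mp h)
    subst this
    rw [PySem.Chars.replace.go]; simp [rep2]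
  | succ fuel ih =>
    intro l acc h
    match l with
    | [] =>
      rw [PySem.Chars.replace.go]
      all_goals simp [rep2]
    | [c] =>
      rw [PySem.Chars.replace.go]
      have hp : [x, y].isPrefixOf [c] = false := by
        simp [List.isPrefixOf]
      simp only [hp, Bool.false_eq_true, if_false]
      rw [ih [] (c :: acc) (by simp)]
      simp [rep2]
    | c :: b :: t =>
      rw [PySem.Chars.replace.go]
      by_cases hm : c = x ∧ b = y
      · obtain ⟨rfl, rfl⟩ := hm
        have hp : [c, b].isPrefixOf (c :: b :: t) = true := by
          simp [List.isPrefixOf]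
        simp only [hp, if_true]
        have hd : List.drop ([c, b].length) (c :: b :: t) = t := rfl
        rw [hd]
        simp only [List.reverse_cons, List.reverse_nil, List.nil_append, List.singleton_append]
        rw [ih t (z :: acc) (by simp at h ⊢; omega)]
        simp [rep2]
      · have hp : [x, y].isPrefixOf (c :: b :: t) = false := by
          simp only [Bool.eq_false_iff, ne_eq]
          intro hT
          rw [List.isPrefixOf_iff_prefix, List.cons_prefix_cons] at hT
          obtain ⟨hx, hT⟩ := hT
          rw [List.cons_prefix_cons] at hT
          exact hm ⟨hx.symm, hT.1.symm⟩
        simp only [hp, Bool.false_eq_true, if_false]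
        rw [ih (b :: t) (c :: acc) (by simp at h ⊢; omega)]
        simp [rep2, hm]

theorem replace_eq_rep2 (x y z : Char) (s : List Char) :
    PySem.Chars.replace s [x, y] [z] = rep2 x y z s := by
  rw [PySem.Chars.replace]
  simp only [List.isEmpty, Bool.false_eq_true, if_false]
  exact go_eq_rep2 x y z s.length s [] (le_refl _)

-- peeling an unmatched head character through one replace pass
theorem rep2_peel (x y z a : Char) (w : List Char)
    (h : a = x → w.head? ≠ some y) : rep2 x y z (a :: w) = a :: rep2 x y z w := by
  match w with
  | [] => rfl
  | b :: t =>
    have : ¬ (a = x ∧ b = y) := by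
      rintro ⟨h1, h2⟩; exact h h1 (by simp [h2])
    simp [rep2, this]

-- the head of a replaced list is the replacement letter or the original head
theorem rep2_head (x y z : Char) (w : List Char) (c : Char)
    (h : (rep2 x y z w).head? = some c) : c = z ∨ w.head? = some c := by
  match w with
  | [] => simp [rep2] at h
  | [a] => simp [rep2] at h; simp [h]
  | a :: b :: t =>
    simp only [rep2] at h
    split_ifs at h with hm
    · simp at h; left; exact h.symm
    · simp at h; right; simp [h]

-- the simultaneous two-char pass (altScan without the single-char table)
def sim : List Char → List Char
  | a :: b :: t =>
    match altPair a b with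
    | some r => r :: sim t
    | none => a :: sim (b :: t)
  | l => l

-- A's five sequential replace passes equal one simultaneous pass
theorem chain_eq_sim : ∀ (s : List Char),
    rep2 '{' '}' 'o' (rep2 '[' ']' 'o' (rep2 '(' ')' 'o'
      (rep2 '|' '>' 'p' (rep2 '|' '<' 'k' s)))) = sim s := by
  intro s
  match s with
  | [] => rfl
  | [a] => simp [rep2_single, sim]
  | a :: b :: t =>
    by_cases h1 : a = '|' ∧ b = '<'
    · obtain ⟨rfl, rfl⟩ := h1
      have e1 : rep2 '|' '<' 'k' ('|' :: '<' :: t) = 'k' :: rep2 '|' '<' 'k' t := by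
        simp [rep2]
      rw [e1, rep2_peel _ _ _ _ _ (by intro h; simp at h),
          rep2_peel _ _ _ _ _ (by intro h; simp at h),
          rep2_peel _ _ _ _ _ (by intro h; simp at h),
          rep2_peel _ _ _ _ _ (by intro h; simp at h),
          chain_eq_sim t]
      simp [sim, altPair]
    · by_cases h2 : a = '|' ∧ b = '>'
      · obtain ⟨rfl, rfl⟩ := h2
        have e1 : rep2 '|' '<' 'k' ('|' :: '>' :: t) = '|' :: '>' :: rep2 '|' '<' 'k' t := by
          rw [rep2_peel _ _ _ _ _ (by intro _ h; simp at h),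
              rep2_peel _ _ _ _ _ (by intro h; simp at h)]
        have e2 : rep2 '|' '>' 'p' ('|' :: '>' :: rep2 '|' '<' 'k' t) =
            'p' :: rep2 '|' '>' 'p' (rep2 '|' '<' 'k' t) := by
          simp [rep2]
        rw [e1, e2, rep2_peel _ _ _ _ _ (by intro h; simp at h),
            rep2_peel _ _ _ _ _ (by intro h; simp at h),
            rep2_peel _ _ _ _ _ (by intro h; simp at h),
            chain_eq_sim t]
        simp [sim, altPair]
      · by_cases h3 : a = '(' ∧ b = ')'
        · obtain ⟨rfl, rfl⟩ := h3
          have e1 : rep2 '|' '<' 'k' ('(' :: ')' :: t) = '(' :: ')' :: rep2 '|' '<' 'k' t := by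
            rw [rep2_peel _ _ _ _ _ (by intro h; simp at h),
                rep2_peel _ _ _ _ _ (by intro h; simp at h)]
          have e2 : rep2 '|' '>' 'p' ('(' :: ')' :: rep2 '|' '<' 'k' t) =
              '(' :: ')' :: rep2 '|' '>' 'p' (rep2 '|' '<' 'k' t) := by
            rw [rep2_peel _ _ _ _ _ (by intro h; simp at h),
                rep2_peel _ _ _ _ _ (by intro h; simp at h)]
          have e3 : rep2 '(' ')' 'o' ('(' :: ')' :: rep2 '|' '>' 'p' (rep2 '|' '<' 'k' t)) =
              'o' :: rep2 '(' ')' 'o' (rep2 '|' '>' 'p' (rep2 '|' '<' 'k' t)) := by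
            simp [rep2]
          rw [e1, e2, e3, rep2_peel _ _ _ _ _ (by intro h; simp at h),
              rep2_peel _ _ _ _ _ (by intro h; simp at h),
              chain_eq_sim t]
          simp [sim, altPair]
        · by_cases h4 : a = '[' ∧ b = ']'
          · obtain ⟨rfl, rfl⟩ := h4
            have e1 : rep2 '|' '<' 'k' ('[' :: ']' :: t) = '[' :: ']' :: rep2 '|' '<' 'k' t := by
              rw [rep2_peel _ _ _ _ _ (by intro h; simp at h),
                  rep2_peel _ _ _ _ _ (by intro h; simp at h)]
            have e2 : rep2 '|' '>' 'p' ('[' :: ']' :: rep2 '|' '<' 'k' t) =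
                '[' :: ']' :: rep2 '|' '>' 'p' (rep2 '|' '<' 'k' t) := by
              rw [rep2_peel _ _ _ _ _ (by intro h; simp at h),
                  rep2_peel _ _ _ _ _ (by intro h; simp at h)]
            have e3 : rep2 '(' ')' 'o' ('[' :: ']' :: rep2 '|' '>' 'p' (rep2 '|' '<' 'k' t)) =
                '[' :: ']' :: rep2 '(' ')' 'o' (rep2 '|' '>' 'p' (rep2 '|' '<' 'k' t)) := by
              rw [rep2_peel _ _ _ _ _ (by intro h; simp at h),
                  rep2_peel _ _ _ _ _ (by intro h; simp at h)]
            have e4 : rep2 '[' ']' 'o'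
                ('[' :: ']' :: rep2 '(' ')' 'o' (rep2 '|' '>' 'p' (rep2 '|' '<' 'k' t))) =
                'o' :: rep2 '[' ']' 'o' (rep2 '(' ')' 'o' (rep2 '|' '>' 'p' (rep2 '|' '<' 'k' t))) := by
              simp [rep2]
            rw [e1, e2, e3, e4, rep2_peel _ _ _ _ _ (by intro h; simp at h), chain_eq_sim t]
            simp [sim, altPair]
          · by_cases h5 : a = '{' ∧ b = '}'
            · obtain ⟨rfl, rfl⟩ := h5
              have e1 : rep2 '|' '<' 'k' ('{' :: '}' :: t) = '{' :: '}' :: rep2 '|' '<' 'k' t := by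
                rw [rep2_peel _ _ _ _ _ (by intro h; simp at h),
                    rep2_peel _ _ _ _ _ (by intro h; simp at h)]
              have e2 : rep2 '|' '>' 'p' ('{' :: '}' :: rep2 '|' '<' 'k' t) =
                  '{' :: '}' :: rep2 '|' '>' 'p' (rep2 '|' '<' 'k' t) := by
                rw [rep2_peel _ _ _ _ _ (by intro h; simp at h),
                    rep2_peel _ _ _ _ _ (by intro h; simp at h)]
              have e3 : rep2 '(' ')' 'o' ('{' :: '}' :: rep2 '|' '>' 'p' (rep2 '|' '<' 'k' t)) =
                  '{' :: '}' :: rep2 '(' ')' 'o' (rep2 '|' '>' 'p' (rep2 '|' '<' 'k' t)) := by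
                rw [rep2_peel _ _ _ _ _ (by intro h; simp at h),
                    rep2_peel _ _ _ _ _ (by intro h; simp at h)]
              have e4 : rep2 '[' ']' 'o'
                  ('{' :: '}' :: rep2 '(' ')' 'o' (rep2 '|' '>' 'p' (rep2 '|' '<' 'k' t))) =
                  '{' :: '}' :: rep2 '[' ']' 'o' (rep2 '(' ')' 'o' (rep2 '|' '>' 'p' (rep2 '|' '<' 'k' t))) := by
                rw [rep2_peel _ _ _ _ _ (by intro h; simp at h),
                    rep2_peel _ _ _ _ _ (by intro h; simp at h)]
              have e5 : rep2 '{' '}' 'o'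
                  ('{' :: '}' :: rep2 '[' ']' 'o' (rep2 '(' ')' 'o' (rep2 '|' '>' 'p' (rep2 '|' '<' 'k' t)))) =
                  'o' :: rep2 '{' '}' 'o' (rep2 '[' ']' 'o' (rep2 '(' ')' 'o' (rep2 '|' '>' 'p' (rep2 '|' '<' 'k' t)))) := by
                simp [rep2]
              rw [e1, e2, e3, e4, e5, chain_eq_sim t]
              simp [sim, altPair]
            · -- no two-char pattern at the front: peel `a` through all five passes
              have hb : altPair a b = none := by
                simp [altPair, h1, h2, h3, h4, h5]
              have p1 : rep2 '|' '<' 'k' (a :: b :: t) = a :: rep2 '|' '<' 'k' (b :: t) := by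
                apply rep2_peel
                intro ha hc; simp at hc; exact h1 ⟨ha, hc⟩
              have hd1 : ∀ c, (rep2 '|' '<' 'k' (b :: t)).head? = some c → c = 'k' ∨ c = b := by
                intro c hc
                rcases rep2_head _ _ _ _ _ hc with h | h
                · left; exact h
                · right; simp at h; exact h.symm
              have p2 : rep2 '|' '>' 'p' (a :: rep2 '|' '<' 'k' (b :: t)) =
                  a :: rep2 '|' '>' 'p' (rep2 '|' '<' 'k' (b :: t)) := by
                apply rep2_peel
                intro ha hc
                rcases hd1 _ hc with h | h
                · simp at h
                · exact h2 ⟨ha, h ▸ rfl⟩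
              have hd2 : ∀ c, (rep2 '|' '>' 'p' (rep2 '|' '<' 'k' (b :: t))).head? = some c →
                  c = 'p' ∨ c = 'k' ∨ c = b := by
                intro c hc
                rcases rep2_head _ _ _ _ _ hc with h | h
                · left; exact h
                · right; exact hd1 _ h
              have p3 : rep2 '(' ')' 'o' (a :: rep2 '|' '>' 'p' (rep2 '|' '<' 'k' (b :: t))) =
                  a :: rep2 '(' ')' 'o' (rep2 '|' '>' 'p' (rep2 '|' '<' 'k' (b :: t))) := by
                apply rep2_peel
                intro ha hc
                rcases hd2 _ hc with h | h | h
                · simp at h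
                · simp at h
                · exact h3 ⟨ha, h ▸ rfl⟩
              have hd3 : ∀ c, (rep2 '(' ')' 'o' (rep2 '|' '>' 'p' (rep2 '|' '<' 'k' (b :: t)))).head? = some c →
                  c = 'o' ∨ c = 'p' ∨ c = 'k' ∨ c = b := by
                intro c hc
                rcases rep2_head _ _ _ _ _ hc with h | h
                · left; exact h
                · right; exact hd2 _ h
              have p4 : rep2 '[' ']' 'o' (a :: rep2 '(' ')' 'o' (rep2 '|' '>' 'p' (rep2 '|' '<' 'k' (b :: t)))) =
                  a :: rep2 '[' ']' 'o' (rep2 '(' ')' 'o' (rep2 '|' '>' 'p' (rep2 '|' '<' 'k' (b :: t)))) := by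
                apply rep2_peel
                intro ha hc
                rcases hd3 _ hc with h | h | h | h
                · simp at h
                · simp at h
                · simp at h
                · exact h4 ⟨ha, h ▸ rfl⟩
              have hd4 : ∀ c, (rep2 '[' ']' 'o' (rep2 '(' ')' 'o' (rep2 '|' '>' 'p' (rep2 '|' '<' 'k' (b :: t))))).head? = some c →
                  c = 'o' ∨ c = 'o' ∨ c = 'p' ∨ c = 'k' ∨ c = b := by
                intro c hc
                rcases rep2_head _ _ _ _ _ hc with h | h
                · left; exact h
                · right; exact hd3 _ h
              have p5 : rep2 '{' '}' 'o' (a :: rep2 '[' ']' 'o' (rep2 '(' ')' 'o' (rep2 '|' '>' 'p' (rep2 '|' '<' 'k' (b :: t))))) =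
                  a :: rep2 '{' '}' 'o' (rep2 '[' ']' 'o' (rep2 '(' ')' 'o' (rep2 '|' '>' 'p' (rep2 '|' '<' 'k' (b :: t))))) := by
                apply rep2_peel
                intro ha hc
                rcases hd4 _ hc with h | h | h | h | h
                · simp at h
                · simp at h
                · simp at h
                · simp at h
                · exact h5 ⟨ha, h ▸ rfl⟩
              rw [p1, p2, p3, p4, p5, chain_eq_sim (b :: t)]
              simp [sim, hb]
termination_by s => s.length
decreasing_by all_goals (simp; try omega)

-- B's scan is the simultaneous pass followed by the single-char table
theorem altScan_eq_map_sim : ∀ (s : List Char), altScan s = (sim s).map altSingle := by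
  intro s
  match s with
  | [] => rfl
  | [a] => rfl
  | a :: b :: t =>
    simp only [altScan, sim]
    match hp : altPair a b with
    | some r =>
      have hr : altSingle r = r := by
        unfold altPair at hp
        split_ifs at hp <;> cases hp <;> rfl
      simp [altScan_eq_map_sim t, hr]
    | none => simp [altScan_eq_map_sim (b :: t)]
termination_by s => s.length
decreasing_by all_goals simp

-- getD / set on an index right after a prefix
theorem getD_append_len (l₁ : List Char) (c : Char) (t : List Char) (d : Char) :
    (l₁ ++ c :: t).getD l₁.length d = c := by
  induction l₁ with
  | nil => rfl
  | cons x xs ih => simp [ih]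

theorem set_append_len (l₁ : List Char) (c v : Char) (t : List Char) :
    (l₁ ++ c :: t).set l₁.length v = l₁ ++ v :: t := by
  induction l₁ with
  | nil => rfl
  | cons x xs ih => simp [ih]

-- A's index loop is an elementwise map, provided each step rewrites exactly position i
theorem foldl_range_map (step : List Char → Int → List Char) (f : Char → Char)
    (hstep : ∀ (l₁ : List Char) (c : Char) (t : List Char),
      step (l₁ ++ c :: t) (l₁.length : Int) = l₁ ++ f c :: t) :
    ∀ (l₂ l₁ : List Char),
      (PySem.List.pyRange (l₁.length : Int) ((l₁.length : Int) + (l₂.length : Int)) 1).foldl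
        step (l₁ ++ l₂) = l₁ ++ l₂.map f := by
  intro l₂
  induction l₂ with
  | nil => intro l₁; simp [PySem.List.pyRange]
  | cons c t ih =>
    intro l₁
    have hlt : (l₁.length : Int) < (l₁.length : Int) + ((c :: t).length : Int) := by
      simp only [List.length_cons]; omega
    rw [PySem.List.pyRange_one_cons hlt, List.foldl_cons, hstep l₁ c t]
    have := ih (l₁ ++ [f c])
    simp only [List.append_assoc, List.singleton_append, List.length_append,
      List.length_singleton] at this
    have harg : (l₁.length : Int) + 1 = ((l₁.length + 1 : Nat) : Int) := by push_cast; ring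
    have hend : (l₁.length : Int) + ((c :: t).length : Int) =
        ((l₁.length + 1 : Nat) : Int) + (t.length : Int) := by
      simp; ring
    rw [harg, hend, this]
    simp

-- the concrete loop body of port A rewrites position i through altSingle
theorem stepA_spec (l₁ : List Char) (c : Char) (t : List Char) :
    stepA (l₁ ++ c :: t) (l₁.length : Int) = l₁ ++ altSingle c :: t := by
  simp only [stepA, PySem.List.pyGetD_natCast, PySem.List.pySetD_natCast,
    getD_append_len, set_append_len, altSingle]
  split_ifs <;> rfl

-- ===== VERDICT (by name: the statement is the Claim_ definition above) =====
theorem StringReplacer_spec : Claim_equal_StringReplacer := by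
  intro targstr _
  unfold Spec_StringReplacer StringReplacer StringReplacer_alt
  simp only [PySem.Str.replace, PySem.Str.len_eq, String.toList_ofList]
  rw [show ("|<" : String).toList = ['|', '<'] from rfl,
      show ("k" : String).toList = ['k'] from rfl,
      show ("|>" : String).toList = ['|', '>'] from rfl,
      show ("p" : String).toList = ['p'] from rfl,
      show ("()" : String).toList = ['(', ')'] from rfl,
      show ("o" : String).toList = ['o'] from rfl,
      show ("[]" : String).toList = ['[', ']'] from rfl,
      show ("{}" : String).toList = ['{', '}'] from rfl]
  rw [replace_eq_rep2, replace_eq_rep2, replace_eq_rep2, replace_eq_rep2, replace_eq_rep2]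
  set w := rep2 '{' '}' 'o' (rep2 '[' ']' 'o' (rep2 '(' ')' 'o'
    (rep2 '|' '>' 'p' (rep2 '|' '<' 'k' targstr.toList)))) with hw
  have hm := foldl_range_map stepA altSingle stepA_spec w []
  simp only [List.length_nil, List.nil_append, Nat.cast_zero, zero_add] at hm
  rw [hm, hw, chain_eq_sim, ← altScan_eq_map_sim]
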